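-- pv_equiv track=rewrite | github.com/Pempho-Mackson-Kapulula/static-site-generator | src/block_type.py | line_starts_as_heading
-- ===== SOURCE A (Python) =====
-- def line_starts_as_heading(block):
--     first_line = block.split("\n")[0]
--
--     if not first_line.startswith("#"):
--         return False
--
--     i = 0
--     while i < len(first_line) and first_line[i] == "#":
--         i += 1
--
--     if i == 0 or i > 6:
--         return False
--
--     if i >= len(first_line):
--         return False
--
--     return first_line[i] == " "
-- ===== SOURCE B (Python) =====
-- HEADING_PREFIXES = tuple("#" * k + " " for k in range(1, 7))
--
-- def line_starts_as_heading(block):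
--     return block.split("\n")[0].startswith(HEADING_PREFIXES)
-- ===== Notes on version B (the rewrite author's own statement) =====
-- stated objective: idiomatic
-- what changed: Replaces the explicit leading-hash counting loop and the separate count/length/space checks with a single startswith against a fixed table of the six legal heading prefixes (k hashes followed by a space, for k from 1 to 6), correct because at most one table entry can match and it matches exactly when the heading is well-formed.
import Mathlib
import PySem

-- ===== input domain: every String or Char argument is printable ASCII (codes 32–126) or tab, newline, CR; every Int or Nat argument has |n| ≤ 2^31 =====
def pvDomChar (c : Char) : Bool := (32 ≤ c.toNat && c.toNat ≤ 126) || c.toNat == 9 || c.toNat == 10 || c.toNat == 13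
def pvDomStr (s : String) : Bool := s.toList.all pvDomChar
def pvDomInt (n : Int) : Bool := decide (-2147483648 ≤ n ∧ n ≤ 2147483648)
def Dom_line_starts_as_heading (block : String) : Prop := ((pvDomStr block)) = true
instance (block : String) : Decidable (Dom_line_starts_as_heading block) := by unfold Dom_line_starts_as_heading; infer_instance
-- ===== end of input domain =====

-- B replaces A's explicit '#'-counting while loop and its count/length/space checks
-- with a single startswith against the fixed table of the six legal heading prefixes
-- "# " .. "###### " (objective: idiomatic).

-- ===== PORT A =====
-- the while loop 'while i < len(fl) and fl[i] == "#": i += 1' started at i = 0,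
-- as structural recursion over the list of characters
def pvAWhileCount : List Char → Nat
  | [] => 0
  | c :: rest => if c = '#' then pvAWhileCount rest + 1 else 0

def line_starts_as_heading (block : String) : Bool :=
  let first_line := (PySem.Chars.splitOn block.toList ['\n']).headD []
  if ¬ (PySem.Chars.startswith first_line ['#'] = true) then false
  else
    let i := pvAWhileCount first_line
    if i = 0 ∨ i > 6 then false
    else if i ≥ first_line.length then false
    else decide (PySem.List.pyGet? first_line (i : Int) = some ' ')

-- ===== PORT B =====
-- HEADING_PREFIXES = tuple("#" * k + " " for k in range(1, 7)); startswith with a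
-- tuple of prefixes is ported as 'any' of startswith over that list (exact).
def pvHeadingPrefixes : List (List Char) :=
  (PySem.List.pyRange 1 7 1).map (fun k => List.replicate k.toNat '#' ++ [' '])

def line_starts_as_heading_alt (block : String) : Bool :=
  pvHeadingPrefixes.any
    (fun p => PySem.Chars.startswith ((PySem.Chars.splitOn block.toList ['\n']).headD []) p)

-- ===== PRECONDITION & SPEC =====
def Spec_line_starts_as_heading (block : String) (out : Bool) : Prop := out = line_starts_as_heading_alt block
instance (block : String) (out : Bool) : Decidable (Spec_line_starts_as_heading block out) := by unfold Spec_line_starts_as_heading; infer_instance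

-- ===== CLAIM (what is proved, stated in full; the proofs are below) =====
def Claim_equal_line_starts_as_heading : Prop := ∀ (block : String), Dom_line_starts_as_heading block → Spec_line_starts_as_heading block (line_starts_as_heading block)

-- ===== LEMMAS AND PROOFS =====

theorem pvAWhileCount_eq_takeWhile (l : List Char) :
    pvAWhileCount l = (l.takeWhile (· == '#')).length := by
  induction l with
  | nil => rfl
  | cons c rest ih =>
    by_cases h : c = '#' <;> simp [pvAWhileCount, h, ih]

theorem pvTakeWhile_replicate_append (k : Nat) (t : List Char) :
    (List.replicate k '#' ++ ' ' :: t).takeWhile (· == '#') = List.replicate k '#' := by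
  induction k with
  | zero => simp
  | succ n ih => simp [List.replicate_succ, ih]

-- startswith one of the table's prefixes ↔ the '#'-count is exactly k and l[k] = ' '
theorem pvPrefix_iff (l : List Char) (k : Nat) :
    PySem.Chars.startswith l (List.replicate k '#' ++ [' ']) = true ↔
      ((l.takeWhile (· == '#')).length = k ∧ PySem.List.pyGet? l (k : Int) = some ' ') := by
  rw [PySem.Chars.startswith_iff]
  constructor
  · rintro ⟨t, ht⟩
    have ht' : l = List.replicate k '#' ++ ' ' :: t := by
      rw [← ht]; simp
    subst ht'
    refine ⟨by rw [pvTakeWhile_replicate_append k t]; simp, ?_⟩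
    have h := PySem.List.pyGet?_append_length (pre := List.replicate k '#') (y := ' ') (ys := t)
    rw [List.length_replicate] at h
    exact h
  · rintro ⟨hlen, hget⟩
    have hgk : l[k]? = some ' ' := by simpa using hget
    obtain ⟨hk, heq⟩ := List.getElem?_eq_some_iff.mp hgk
    have hrep : l.takeWhile (· == '#') = List.replicate k '#' :=
      List.eq_replicate_iff.mpr ⟨hlen, fun b hb =>
        eq_of_beq (List.mem_takeWhile_imp (p := (· == '#')) hb)⟩
    have hsplit := List.takeWhile_append_dropWhile (p := (· == '#')) (l := l)
    have hdrop : l.dropWhile (· == '#') = l.drop k := by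
      conv_rhs => rw [← hsplit]
      rw [hrep]
      simp
    have hcons : l.drop k = ' ' :: l.drop (k + 1) := by
      rw [← heq]
      exact (List.getElem_cons_drop hk).symm
    refine ⟨l.drop (k + 1), ?_⟩
    conv_rhs => rw [← hsplit, hrep, hdrop, hcons]
    simp

-- A returns true exactly when the count lies in 1..6 and the char after the hashes is ' '
theorem pvA_true_iff (l : List Char) :
    (if ¬ (PySem.Chars.startswith l ['#'] = true) then false
     else
       let i := pvAWhileCount l
       if i = 0 ∨ i > 6 then false
       else if i ≥ l.length then false
       else decide (PySem.List.pyGet? l (i : Int) = some ' ')) = true ↔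
      (1 ≤ (l.takeWhile (· == '#')).length ∧ (l.takeWhile (· == '#')).length ≤ 6 ∧
       PySem.List.pyGet? l (((l.takeWhile (· == '#')).length : Nat) : Int) = some ' ') := by
  rw [pvAWhileCount_eq_takeWhile]
  set n := (l.takeWhile (· == '#')).length with hn
  have hstart : PySem.Chars.startswith l ['#'] = true ↔ 1 ≤ n := by
    rcases l with _ | ⟨c, rest⟩
    · simp [PySem.Chars.startswith, hn]
    · by_cases hc : c = '#'
      · constructor
        · intro _; simp [hn, hc]
        · intro _
          exact (PySem.Chars.startswith_iff _ _).mpr ⟨rest, by simp [hc]⟩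
      · have hc' : ¬ (c == '#') = true := by simpa using hc
        constructor
        · intro h
          exfalso
          obtain ⟨t, ht⟩ := (PySem.Chars.startswith_iff _ _).mp h
          exact hc (by simpa using congrArg (·.head?) ht.symm)
        · intro h1
          exfalso
          simp [hn, hc'] at h1
  by_cases hs : PySem.Chars.startswith l ['#'] = true
  · have h1 : 1 ≤ n := hstart.mp hs
    simp only [hs, not_true, if_false]
    by_cases hbig : n = 0 ∨ n > 6
    · have : ¬ n ≤ 6 := by omega
      simp [hbig, this]
    · have h6 : n ≤ 6 := by omega
      simp only [hbig, if_false]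
      by_cases hlen : n ≥ l.length
      · have : PySem.List.pyGet? l (n : Int) ≠ some ' ' := by
          intro h
          have := (List.getElem?_eq_some_iff.mp (by simpa using h)).1
          omega
        simp [hlen]
      · simp [hlen, h1, h6]
  · have h0 : n = 0 := by
      by_contra h
      exact hs (hstart.mpr (by omega))
    simp [hs, h0]

theorem pvB_true_iff (l : List Char) :
    (pvHeadingPrefixes.any (fun p => PySem.Chars.startswith l p)) = true ↔
      (1 ≤ (l.takeWhile (· == '#')).length ∧ (l.takeWhile (· == '#')).length ≤ 6 ∧
       PySem.List.pyGet? l (((l.takeWhile (· == '#')).length : Nat) : Int) = some ' ') := by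
  have hpref : pvHeadingPrefixes =
      [1, 2, 3, 4, 5, 6].map (fun k : Nat => List.replicate k '#' ++ [' ']) := by
    decide
  rw [hpref]
  simp only [List.any_map, List.any_eq_true]
  constructor
  · rintro ⟨k, hk, h⟩
    obtain ⟨hlen, hget⟩ := (pvPrefix_iff l k).mp (by simpa using h)
    have hk' : 1 ≤ k ∧ k ≤ 6 := by fin_cases hk <;> omega
    exact ⟨by omega, by omega, by rw [hlen]; exact hget⟩
  · rintro ⟨h1, h6, hget⟩
    refine ⟨(l.takeWhile (· == '#')).length, ?_,
      by simpa using (pvPrefix_iff l _).mpr ⟨rfl, hget⟩⟩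
    interval_cases (l.takeWhile (· == '#')).length <;> simp

-- ===== VERDICT (by name: the statement is the Claim_ definition above) =====
theorem line_starts_as_heading_spec : Claim_equal_line_starts_as_heading := by
  intro block _
  unfold Spec_line_starts_as_heading line_starts_as_heading line_starts_as_heading_alt
  set l := (PySem.Chars.splitOn block.toList ['\n']).headD [] with hl
  have hA := pvA_true_iff l
  have hB := pvB_true_iff l
  apply Bool.coe_iff_coe.mp
  rw [hA, hB]
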